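-- pv_equiv track=rewrite | github.com/Song-of-your-soul/projector_homework | Homework_9.py | cats_in_hats
-- ===== SOURCE A (Python) =====
-- def pick_cat(cats: int, pick: int) -> list:
--     round = pick
--     picked_cats = []
--     for number in range(cats + 1)[1:]:
--         if number == round:
--             picked_cats.append(number)
--             round += pick
--     return picked_cats
--
-- def cats_in_hats(cats: int, rounds: int) -> list:
--     round = 1
--     cats_with_hats = []
--     while round <= rounds:
--         checked_cats = pick_cat(cats, round)
--         for cat in checked_cats:
--             if cat in cats_with_hats:
--                 cats_with_hats.remove(cat)
--             else:
--                 cats_with_hats.append(cat)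
--         round += 1
--     return cats_with_hats
-- ===== SOURCE B (Python) =====
-- def cats_in_hats(cats: int, rounds: int) -> list:
--     # Ordered dict of toggled-on cats; round r flips exactly the multiples of r,
--     # visited by stepping, so the per-round scan over all cats disappears.
--     # Rounds beyond cats flip nothing, so the loop stops at min(rounds, cats).
--     hats = {}
--     for r in range(1, min(rounds, cats) + 1):
--         for m in range(r, cats + 1, r):
--             if m in hats:
--                 del hats[m]
--             else:
--                 hats[m] = True
--     return list(hats)
-- ===== Notes on version B (the rewrite author's own statement) =====
-- stated objective: faster
-- what changed: Instead of scanning all cats each round (pick_cat) and toggling membership in a plain list with linear 'in'/'remove', B steps directly through the multiples of each round, toggles them in an insertion-ordered dict (del + reinsert reproduces remove + append order), and stops the round loop at min(rounds, cats) since later rounds have no multiples.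
import Mathlib
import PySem

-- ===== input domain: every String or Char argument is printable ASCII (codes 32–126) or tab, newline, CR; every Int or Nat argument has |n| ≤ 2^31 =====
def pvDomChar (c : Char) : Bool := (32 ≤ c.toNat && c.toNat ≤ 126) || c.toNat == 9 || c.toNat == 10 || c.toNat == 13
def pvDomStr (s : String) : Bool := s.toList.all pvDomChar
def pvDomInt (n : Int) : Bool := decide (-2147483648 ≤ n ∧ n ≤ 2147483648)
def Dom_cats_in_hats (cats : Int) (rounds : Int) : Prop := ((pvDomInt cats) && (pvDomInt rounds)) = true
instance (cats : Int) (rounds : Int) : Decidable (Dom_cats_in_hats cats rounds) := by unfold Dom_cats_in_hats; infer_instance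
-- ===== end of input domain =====

-- B replaces A's per-round scan over every cat (pick_cat) and the list membership/remove
-- toggle by stepping the multiples of each round directly and toggling in an
-- insertion-ordered dict, stopping the round loop at min(rounds, cats); same return value.

-- ===== PORT A =====
def pick_cat (cats : Int) (pick : Int) : List Int :=
  ((PySem.List.slice (PySem.List.pyRange 0 (cats + 1) 1) (some 1) none).foldl
    (fun (st : Int × List Int) number =>
      if number = st.1 then (st.1 + pick, st.2 ++ [number]) else st)
    (pick, [])).2

def cats_in_hats (cats : Int) (rounds : Int) : List Int :=
  (PySem.List.pyRange 1 (rounds + 1) 1).foldl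
    (fun cats_with_hats round =>
      (pick_cat cats round).foldl
        (fun L cat =>
          if cat ∈ L then (PySem.List.remove? L cat).getD L else L ++ [cat])
        cats_with_hats)
    []

-- ===== PORT B =====
def cats_in_hats_alt (cats : Int) (rounds : Int) : List Int :=
  ((PySem.List.pyRange 1 (min rounds cats + 1) 1).foldl
    (fun hats r =>
      (PySem.List.pyRange r (cats + 1) r).foldl
        (fun d m => if d.contains m then d.erase m else d.insert m true)
        hats)
    (PySem.Dict.empty : PySem.Dict Int Bool)).keys

-- ===== PRECONDITION & SPEC =====
def Spec_cats_in_hats (cats : Int) (rounds : Int) (out : List Int) : Prop := out = cats_in_hats_alt cats rounds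
instance (cats : Int) (rounds : Int) (out : List Int) : Decidable (Spec_cats_in_hats cats rounds out) := by unfold Spec_cats_in_hats; infer_instance

-- ===== CLAIM (what is proved, stated in full; the proofs are below) =====
def Claim_equal_cats_in_hats : Prop := ∀ (cats : Int) (rounds : Int), Dom_cats_in_hats cats rounds → Spec_cats_in_hats cats rounds (cats_in_hats cats rounds)

-- ===== LEMMAS AND PROOFS =====

-- pyRange with a positive step: nil and cons forms
theorem pyRange_pos_eq_nil (a b s : Int) (hs : 0 < s) (h : b ≤ a) :
    PySem.List.pyRange a b s = [] := by
  rw [PySem.List.pyRange_of_pos a b hs]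
  simp [show ¬ a < b by omega]

theorem pyRange_pos_cons (a b s : Int) (hs : 0 < s) (h : a < b) :
    PySem.List.pyRange a b s = a :: PySem.List.pyRange (a + s) b s := by
  rw [PySem.List.pyRange_of_pos a b hs, PySem.List.pyRange_of_pos (a+s) b hs]
  have key : b - a + s - 1 = (b - a - 1) + 1 * s := by ring
  have h1 : (b - a + s - 1) / s = (b - a - 1) / s + 1 := by
    rw [key, Int.add_mul_ediv_right _ _ (by omega : s ≠ 0)]
  have hnn : 0 ≤ (b - a - 1) / s := Int.ediv_nonneg (by omega) (by omega)
  have hcnt : ((b - a + s - 1) / s).toNat = ((b - a - 1) / s).toNat + 1 := by omega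
  simp only [if_pos h, hcnt]
  by_cases h2 : a + s < b
  · have h3 : b - (a + s) + s - 1 = b - a - 1 := by ring
    rw [if_pos h2, h3, List.range_succ_eq_map]
    simp [List.map_map, Function.comp]
    intro k _; ring
  · have hz : (b - a - 1) / s = 0 :=
      Int.ediv_eq_zero_of_lt (by omega) (by omega)
    rw [if_neg h2]
    simp [hz]

-- pick_cat's scan over 1..cats collects exactly the multiples of pick
theorem pick_aux_fuel (cats pick : Int) (hp : 1 ≤ pick) :
    ∀ (k : Nat) (n r : Int) (acc : List Int), (cats + 1 - n).toNat ≤ k → n ≤ r →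
      ((PySem.List.pyRange n (cats + 1) 1).foldl
        (fun (st : Int × List Int) number =>
          if number = st.1 then (st.1 + pick, st.2 ++ [number]) else st)
        (r, acc)).2 = acc ++ PySem.List.pyRange r (cats + 1) pick := by
  intro k
  induction k with
  | zero =>
    intro n r acc hk hnr
    rw [PySem.List.pyRange_one_eq_nil (by omega), pyRange_pos_eq_nil r (cats+1) pick (by omega) (by omega)]
    simp
  | succ k ih =>
    intro n r acc hk hnr
    by_cases hb : cats + 1 ≤ n
    · rw [PySem.List.pyRange_one_eq_nil (by omega), pyRange_pos_eq_nil r (cats+1) pick (by omega) (by omega)]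
      simp
    · rw [PySem.List.pyRange_one_cons (by omega : n < cats + 1), List.foldl_cons]
      by_cases hnr2 : n = r
      · simp only [if_pos hnr2]
        rw [ih (n+1) (r+pick) (acc ++ [n]) (by omega) (by omega)]
        rw [pyRange_pos_cons r (cats+1) pick (by omega) (by omega), ← hnr2]
        simp
      · simp only [if_neg hnr2]
        exact ih (n+1) r acc (by omega) (by omega)

theorem pick_cat_eq (cats pick : Int) (hp : 1 ≤ pick) :
    pick_cat cats pick = PySem.List.pyRange pick (cats + 1) pick := by
  unfold pick_cat
  rw [PySem.List.slice_from _ (by omega : (0:Int) ≤ 1)]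
  by_cases hc : cats + 1 ≤ 0
  · rw [PySem.List.pyRange_one_eq_nil (by omega), pyRange_pos_eq_nil pick (cats+1) pick (by omega) (by omega)]
    simp
  · rw [PySem.List.pyRange_one_cons (by omega : (0:Int) < cats + 1)]
    simpa using pick_aux_fuel cats pick hp (cats + 1 - 1).toNat 1 pick [] (by omega) hp

-- erasing a key from a dict filters it out of the key list
theorem keys_erase_eq (d : PySem.Dict Int Bool) (m : Int) :
    (d.erase m).keys = d.keys.filter (fun k => k != m) := by
  simp only [PySem.Dict.erase, PySem.Dict.keys, List.filter_map, Function.comp_def, bne]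

-- A's list toggle and B's dict toggle stay in lockstep: the list IS the dict's key list
theorem toggle_fold (ms : List Int) :
    ∀ (d : PySem.Dict Int Bool), d.keys.Nodup →
      (ms.foldl
        (fun L cat => if cat ∈ L then (PySem.List.remove? L cat).getD L else L ++ [cat])
        d.keys
       = (ms.foldl (fun d m => if d.contains m then d.erase m else d.insert m true) d).keys)
      ∧ (ms.foldl (fun d m => if d.contains m then d.erase m else d.insert m true) d).keys.Nodup := by
  induction ms with
  | nil => intro d hd; exact ⟨rfl, hd⟩
  | cons m ms ih =>
    intro d hd
    rw [List.foldl_cons, List.foldl_cons]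
    by_cases hm : m ∈ d.keys
    · have hc : d.contains m = true := (PySem.Dict.contains_iff_mem_keys d m).mpr hm
      rw [if_pos hm, if_pos hc, PySem.List.remove?_eq_some_erase d.keys m hm]
      have he : d.keys.erase m = (d.erase m).keys := by
        rw [keys_erase_eq, List.Nodup.erase_eq_filter hd]
      simp only [Option.getD_some, he]
      exact ih (d.erase m) (by rw [← he]; exact hd.erase m)
    · have hc : d.contains m = false := by
        rw [← Bool.not_eq_true, PySem.Dict.contains_iff_mem_keys]; exact hm
      rw [if_neg hm, if_neg (by simp [hc]), ← PySem.Dict.keys_insert_of_not_contains d true hc]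
      exact ih (d.insert m true) (PySem.Dict.nodup_keys_insert d m true hd)

-- the round loop, on any common list of rounds
theorem rounds_fold (cats : Int) (rs : List Int) :
    ∀ (d : PySem.Dict Int Bool), d.keys.Nodup →
      (rs.foldl
        (fun L r =>
          (PySem.List.pyRange r (cats + 1) r).foldl
            (fun L cat => if cat ∈ L then (PySem.List.remove? L cat).getD L else L ++ [cat]) L)
        d.keys
       = (rs.foldl
            (fun h r =>
              (PySem.List.pyRange r (cats + 1) r).foldl
                (fun d m => if d.contains m then d.erase m else d.insert m true) h)
            d).keys)
      ∧ (rs.foldl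
            (fun h r =>
              (PySem.List.pyRange r (cats + 1) r).foldl
                (fun d m => if d.contains m then d.erase m else d.insert m true) h)
            d).keys.Nodup := by
  induction rs with
  | nil => intro d hd; exact ⟨rfl, hd⟩
  | cons r rs ih =>
    intro d hd
    rw [List.foldl_cons, List.foldl_cons]
    obtain ⟨h1, h2⟩ := toggle_fold (PySem.List.pyRange r (cats + 1) r) d hd
    rw [h1]
    exact ih _ h2

-- rounds whose multiple list is empty change nothing in A's fold
theorem fold_id (rs : List Int) (cats : Int) (L : List Int)
    (h : ∀ r ∈ rs, PySem.List.pyRange r (cats + 1) r = []) :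
    (rs.foldl
      (fun L r =>
        (PySem.List.pyRange r (cats + 1) r).foldl
          (fun L cat => if cat ∈ L then (PySem.List.remove? L cat).getD L else L ++ [cat]) L)
      L) = L := by
  induction rs generalizing L with
  | nil => rfl
  | cons r rs ih =>
    rw [List.foldl_cons, h r (by simp)]
    exact ih L (fun x hx => h x (by simp [hx]))

-- replace pick_cat by the multiples range throughout A
theorem cats_in_hats_eq_ranges (cats rounds : Int) :
    cats_in_hats cats rounds =
      (PySem.List.pyRange 1 (rounds + 1) 1).foldl
        (fun L r =>
          (PySem.List.pyRange r (cats + 1) r).foldl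
            (fun L cat => if cat ∈ L then (PySem.List.remove? L cat).getD L else L ++ [cat]) L)
        [] := by
  unfold cats_in_hats
  apply PySem.List.foldl_congr_mem
  intro acc r hr
  rw [pick_cat_eq cats r ((PySem.List.mem_pyRange_one.mp hr).1)]

theorem cats_in_hats_spec : Claim_equal_cats_in_hats := by
  unfold Claim_equal_cats_in_hats Spec_cats_in_hats
  intro cats rounds _
  rw [cats_in_hats_eq_ranges]
  unfold cats_in_hats_alt
  have hnil : (PySem.Dict.empty : PySem.Dict Int Bool).keys = [] := rfl
  have hnd : (PySem.Dict.empty : PySem.Dict Int Bool).keys.Nodup := by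
    rw [hnil]; exact List.nodup_nil
  have hmain : ∀ rs : List Int,
      (rs.foldl
        (fun L r =>
          (PySem.List.pyRange r (cats + 1) r).foldl
            (fun L cat => if cat ∈ L then (PySem.List.remove? L cat).getD L else L ++ [cat]) L)
        [])
      = (rs.foldl
          (fun h r =>
            (PySem.List.pyRange r (cats + 1) r).foldl
              (fun d m => if d.contains m then d.erase m else d.insert m true) h)
          PySem.Dict.empty).keys := by
    intro rs
    have h := (rounds_fold cats rs PySem.Dict.empty hnd).1
    rwa [hnil] at h
  rcases le_total rounds cats with hrc | hcr
  · rw [min_eq_left hrc]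
    exact hmain _
  · rw [min_eq_right hcr]
    by_cases hc0 : 0 ≤ cats
    · have htail : ∀ r ∈ PySem.List.pyRange (cats + 1) (rounds + 1) 1,
          PySem.List.pyRange r (cats + 1) r = [] := by
        intro r hr
        have := PySem.List.mem_pyRange_one.mp hr
        exact pyRange_pos_eq_nil r (cats + 1) r (by omega) (by omega)
      rw [PySem.List.pyRange_one_append 1 (cats + 1) (rounds + 1) (by omega) (by omega),
        List.foldl_append, fold_id _ cats _ htail]
      exact hmain _
    · have hall : ∀ r ∈ PySem.List.pyRange 1 (rounds + 1) 1,
          PySem.List.pyRange r (cats + 1) r = [] := by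
        intro r hr
        have := PySem.List.mem_pyRange_one.mp hr
        exact pyRange_pos_eq_nil r (cats + 1) r (by omega) (by omega)
      rw [fold_id _ cats _ hall,
        PySem.List.pyRange_one_eq_nil (show (cats:Int) + 1 ≤ 1 by omega)]
      simp only [List.foldl_nil]
      exact hnil.symm
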